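-- pv_equiv track=rewrite | github.com/soldiers1989/trade-1 | app/lib/sec/sec/util/stock.py | getse
-- ===== SOURCE A (Python) =====
-- def getse(code):
--     """
--         get securities exchange of specified stock by code
--     :param code: str, stock code
--     :return:
--         sz, sh or None
--     """
--     # stock code rules
--     codes = {
--         "sh": ['600','601','603'],
--         "sz": ['000','002','300']
--     }
--
--     if len(code) < 3:
--         return None
--
--     code = code[:3]
--     for se in codes.keys():
--         if code in codes[se]:
--             return se
--
--     return None
-- ===== SOURCE B (Python) =====
-- def getse(code):
--     """
--         get securities exchange of specified stock by code
--     :param code: str, stock code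
--     :return:
--         sz, sh or None
--     """
--     if len(code) < 3:
--         return None
--     c0, c1, c2 = code[0], code[1], code[2]
--     if c1 != '0':
--         return None
--     if c0 == '6':
--         return 'sh' if c2 in ('0', '1', '3') else None
--     if c0 == '0':
--         return 'sz' if c2 in ('0', '2') else None
--     if c0 == '3':
--         return 'sz' if c2 == '0' else None
--     return None
-- ===== Notes on version B (the rewrite author's own statement) =====
-- stated objective: alternative
-- what changed: Replaces the table of prefix lists and the scan-with-membership-test by a table-free character decision tree: it inspects the three leading characters directly (all valid prefixes have '0' in the middle, the first character picks the exchange, the last is validated per branch), no dict, no list, no loop.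
import Mathlib
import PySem

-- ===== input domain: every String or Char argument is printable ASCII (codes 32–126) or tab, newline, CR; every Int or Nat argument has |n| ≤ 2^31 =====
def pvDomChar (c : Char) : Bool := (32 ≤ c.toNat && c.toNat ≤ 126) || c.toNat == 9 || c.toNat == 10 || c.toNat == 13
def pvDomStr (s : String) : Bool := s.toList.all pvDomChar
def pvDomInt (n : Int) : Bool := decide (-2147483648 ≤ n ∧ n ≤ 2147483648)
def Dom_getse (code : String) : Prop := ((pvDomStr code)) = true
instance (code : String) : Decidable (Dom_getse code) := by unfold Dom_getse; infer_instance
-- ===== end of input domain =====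

-- B replaces A's prefix-list table and scan by a table-free character decision tree on the three leading characters; same results everywhere.


-- ===== PORT A =====
-- the 'for se in codes.keys(): if code in codes[se]: return se' loop, early return as Option
def getseLoop (codes : PySem.Dict String (List String)) (c : String) : List String → Option String
  | [] => none
  | se :: rest => if (codes.getD se []).contains c then some se else getseLoop codes c rest

def getse (code : String) : Option String :=
  let codes : PySem.Dict String (List String) :=
    PySem.Dict.mk [("sh", ["600", "601", "603"]), ("sz", ["000", "002", "300"])]
  if PySem.Str.len code < 3 then none
  else
    let code := PySem.Str.slice code none (some 3)
    getseLoop codes code codes.keys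

-- ===== PORT B =====
-- B indexes code[0], code[1], code[2]; after the len ≥ 3 guard this is exactly the
-- first three elements of the char list, so the port destructures code.toList.
def getse_alt (code : String) : Option String :=
  if PySem.Str.len code < 3 then none
  else
    match code.toList with
    | c0 :: c1 :: c2 :: _ =>
      if c1 ≠ '0' then none
      else if c0 = '6' then (if c2 = '0' ∨ c2 = '1' ∨ c2 = '3' then some "sh" else none)
      else if c0 = '0' then (if c2 = '0' ∨ c2 = '2' then some "sz" else none)
      else if c0 = '3' then (if c2 = '0' then some "sz" else none)
      else none
    | _ => none

-- ===== PRECONDITION & SPEC =====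
def Spec_getse (code : String) (out : Option String) : Prop := out = getse_alt code
instance (code : String) (out : Option String) : Decidable (Spec_getse code out) := by unfold Spec_getse; infer_instance

-- ===== CLAIM (what is proved, stated in full; the proofs are below) =====
def Claim_equal_getse : Prop := ∀ (code : String), Dom_getse code → Spec_getse code (getse code)

-- ===== LEMMAS AND PROOFS =====

theorem ofList3_eq (c0 c1 c2 : Char) (s : String) :
    (String.ofList [c0, c1, c2] = s) ↔ ([c0, c1, c2] = s.toList) := by
  constructor
  · intro h; rw [← h]; simp
  · intro h; rw [h]; simp

-- A's scan over the two exchanges, applied to an arbitrary 3-char prefix, equals B's decision tree.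
theorem getseLoop_eq_tree (c0 c1 c2 : Char) :
    getseLoop (PySem.Dict.mk [("sh", ["600", "601", "603"]), ("sz", ["000", "002", "300"])])
        (String.ofList [c0, c1, c2]) ["sh", "sz"] =
      (if c1 ≠ '0' then none
       else if c0 = '6' then (if c2 = '0' ∨ c2 = '1' ∨ c2 = '3' then some "sh" else none)
       else if c0 = '0' then (if c2 = '0' ∨ c2 = '2' then some "sz" else none)
       else if c0 = '3' then (if c2 = '0' then some "sz" else none)
       else none) := by
  have t6 : ("600" : String).toList = ['6','0','0'] := by decide
  have t1 : ("601" : String).toList = ['6','0','1'] := by decide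
  have t3 : ("603" : String).toList = ['6','0','3'] := by decide
  have t0 : ("000" : String).toList = ['0','0','0'] := by decide
  have t2 : ("002" : String).toList = ['0','0','2'] := by decide
  have tz : ("300" : String).toList = ['3','0','0'] := by decide
  simp only [getseLoop, PySem.Dict.getD, PySem.Dict.get?]
  by_cases e1 : c1 = '0' <;> by_cases e60 : c0 = '6' <;> by_cases e00 : c0 = '0' <;>
    by_cases e30 : c0 = '3' <;>
    by_cases f0 : c2 = '0' <;> by_cases f1 : c2 = '1' <;> by_cases f2 : c2 = '2' <;>
    by_cases f3 : c2 = '3' <;>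
    simp_all [ofList3_eq]

-- ===== VERDICT (by name: the statement is the Claim_ definition above) =====
theorem getse_spec : Claim_equal_getse := by
  intro code _
  show getse code = getse_alt code
  unfold getse getse_alt
  split
  · rfl
  · rename_i h
    simp only [PySem.Str.len_eq, not_lt] at h
    obtain ⟨c0, c1, c2, l3, rfl0⟩ : ∃ c0 c1 c2 l3, code.toList = c0 :: c1 :: c2 :: l3 := by
      rcases hc : code.toList with _ | ⟨a, _ | ⟨b, _ | ⟨c, t⟩⟩⟩
      all_goals
        first
        | exact ⟨_, _, _, _, rfl⟩
        | (rw [hc] at h; simp only [List.length_cons, List.length_nil] at h; omega)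
    have hsl : PySem.Str.slice code none (some 3) = String.ofList [c0, c1, c2] := by
      have h1 : (PySem.Str.slice code none (some 3)).toList = [c0, c1, c2] := by
        rw [PySem.Str.toList_slice]
        show PySem.List.slice code.toList none (some 3) = _
        rw [PySem.List.slice_to (hb := by norm_num), rfl0]; rfl
      rw [← h1]; exact String.ofList_toList.symm
    rw [rfl0]
    show getseLoop _ (PySem.Str.slice code none (some 3)) _ = _
    rw [hsl]
    exact getseLoop_eq_tree c0 c1 c2
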